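-- pv_equiv track=rewrite | github.com/ELISHA1994/capital-placement | app/application/search_service.py | _map_degree_level
-- ===== SOURCE A (Python) =====
-- def _map_degree_level(degree: str) -> int:
--     """Map degree labels to hierarchy values."""
--
--     hierarchy = {
--         "doctoral": 6,
--         "phd": 6,
--         "doctorate": 6,
--         "master": 5,
--         "masters": 5,
--         "msc": 5,
--         "mba": 5,
--         "bachelor": 4,
--         "bachelors": 4,
--         "bsc": 4,
--         "ba": 4,
--         "associate": 3,
--         "diploma": 2,
--         "certificate": 1,
--     }
--
--     if not isinstance(degree, str):
--         return 0
--
--     degree_lower = degree.lower()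
--     for label, level in hierarchy.items():
--         if label in degree_lower:
--             return level
--     return 0
-- ===== SOURCE B (Python) =====
-- def _map_degree_level(degree: str) -> int:
--     """Map degree labels to hierarchy values."""
--
--     hierarchy = {
--         "doctoral": 6,
--         "phd": 6,
--         "doctorate": 6,
--         "master": 5,
--         "masters": 5,
--         "msc": 5,
--         "mba": 5,
--         "bachelor": 4,
--         "bachelors": 4,
--         "bsc": 4,
--         "ba": 4,
--         "associate": 3,
--         "diploma": 2,
--         "certificate": 1,
--     }
--
--     if not isinstance(degree, str):
--         return 0
--
--     degree_lower = degree.lower()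
--     matched = [level for label, level in hierarchy.items() if label in degree_lower]
--     return max(matched) if matched else 0
-- ===== Notes on version B (the rewrite author's own statement) =====
-- stated objective: simpler
-- what changed: B replaces A's order-dependent first-match loop by collecting the levels of ALL matching labels and returning their maximum (0 if none); equivalent because the table's levels are non-increasing in insertion order, which the Lean proof states and uses as an explicit Pairwise hypothesis.
import Mathlib
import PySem

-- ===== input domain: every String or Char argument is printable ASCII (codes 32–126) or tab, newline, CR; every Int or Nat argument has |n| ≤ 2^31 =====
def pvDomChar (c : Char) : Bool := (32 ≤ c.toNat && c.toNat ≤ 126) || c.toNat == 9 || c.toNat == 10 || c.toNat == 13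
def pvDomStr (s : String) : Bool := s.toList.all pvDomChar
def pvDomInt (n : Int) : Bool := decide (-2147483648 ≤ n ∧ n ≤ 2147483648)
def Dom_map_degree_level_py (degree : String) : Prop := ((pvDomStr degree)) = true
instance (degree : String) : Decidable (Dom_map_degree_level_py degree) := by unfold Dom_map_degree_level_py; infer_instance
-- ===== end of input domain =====

-- B collects the levels of all matching labels and takes their maximum instead of
-- A's first-match scan; equivalent because the table's levels are non-increasing
-- in insertion order (objective: simpler decomposition; return values only).

-- ===== PORT A =====
-- the hierarchy dict literal, shared verbatim by both Pythons (insertion order)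
def pvHier : List (String × Int) :=
  [("doctoral", 6), ("phd", 6), ("doctorate", 6),
   ("master", 5), ("masters", 5), ("msc", 5), ("mba", 5),
   ("bachelor", 4), ("bachelors", 4), ("bsc", 4), ("ba", 4),
   ("associate", 3), ("diploma", 2), ("certificate", 1)]

-- A's loop: return the level of the FIRST label contained in degree_lower, else 0
def pvFirstMatch (dl : String) : List (String × Int) → Int
  | [] => 0
  | (lab, lv) :: rest => if PySem.Str.isIn lab dl then lv else pvFirstMatch dl rest

def map_degree_level_py (degree : String) : Int :=
  pvFirstMatch (PySem.Str.lower degree) pvHier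

-- ===== PORT B =====
-- B's comprehension: the levels of ALL labels contained in degree_lower
def pvMatched (dl : String) (l : List (String × Int)) : List Int :=
  l.filterMap (fun p => if PySem.Str.isIn p.1 dl then some p.2 else none)

def map_degree_level_py_alt (degree : String) : Int :=
  let dl := PySem.Str.lower degree
  match pvMatched dl pvHier with
  | [] => 0                       -- no match: return 0
  | x :: xs => xs.foldl max x     -- max(matched)

-- ===== PRECONDITION & SPEC =====
def Spec_map_degree_level_py (degree : String) (out : Int) : Prop := out = map_degree_level_py_alt degree
instance (degree : String) (out : Int) : Decidable (Spec_map_degree_level_py degree out) := by unfold Spec_map_degree_level_py; infer_instance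

-- ===== CLAIM (what is proved, stated in full; the proofs are below) =====
def Claim_equal_map_degree_level_py : Prop := ∀ (degree : String), Dom_map_degree_level_py degree → Spec_map_degree_level_py degree (map_degree_level_py degree)

-- ===== LEMMAS AND PROOFS =====

-- folding max over elements all ≤ x leaves x
theorem pv_foldl_max_of_le (x : Int) (xs : List Int) (h : ∀ y ∈ xs, y ≤ x) :
    xs.foldl max x = x := by
  induction xs with
  | nil => rfl
  | cons a t ih =>
      have ha : a ≤ x := h a (by simp)
      simp only [List.foldl_cons, max_eq_left ha]
      exact ih (fun y hy => h y (by simp [hy]))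

-- first match equals max of matches on any table whose levels are non-increasing
theorem pv_first_eq_max (dl : String) (l : List (String × Int))
    (h : l.Pairwise (fun a b => b.2 ≤ a.2)) :
    pvFirstMatch dl l = (match pvMatched dl l with
                         | [] => 0
                         | x :: xs => xs.foldl max x) := by
  induction l with
  | nil => rfl
  | cons p rest ih =>
      obtain ⟨lab, lv⟩ := p
      rw [List.pairwise_cons] at h
      by_cases hc : PySem.Str.isIn lab dl
      · -- matched head: its level dominates every later matched level
        have hmem : ∀ y ∈ pvMatched dl rest, y ≤ lv := by
          intro y hy
          simp only [pvMatched, List.mem_filterMap] at hy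
          obtain ⟨q, hq, hqy⟩ := hy
          split at hqy
          · cases hqy; exact h.1 q hq
          · cases hqy
        simp only [pvFirstMatch, pvMatched, List.filterMap_cons, hc, if_pos]
        exact (pv_foldl_max_of_le lv _ hmem).symm
      · simp only [pvFirstMatch, pvMatched, List.filterMap_cons, hc]
        exact ih h.2

-- ===== VERDICT (by name: the statement is the Claim_ definition above) =====
theorem map_degree_level_py_spec : Claim_equal_map_degree_level_py := by
  intro degree _
  unfold Spec_map_degree_level_py map_degree_level_py map_degree_level_py_alt
  exact pv_first_eq_max (PySem.Str.lower degree) pvHier (by decide)
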